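-- pv_equiv track=rewrite | github.com/Alizgaa/Algorithms | fdsfa.py | process_number
-- ===== SOURCE A (Python) =====
-- def is_number(value):
--     """
--     (12.5 marks)
--     Given a variable, return True if the variable is of type int or float,
--     False otherwise.
--     """
--     # TODO To be completed
--     if type(value) == int or type(value) == float:
--         return True
--     else:
--         return False
--
-- def process_number(n: int):
--     """
--     (12.5 marks)
--     Given an int, convert each group of two digits into their associated ascii
--     character value (hint: chr(int) function) and return a string with all the
--     characters. You may assume that the number has an even number of digits and
--     is a positive number.
--     Example:
--     58979943 -> 58 97 99 43 -> ":ac+"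
--
--     You must perform type checking to ensure the inputs are of correct type. If
--     the input is not of correct type, your function should return None
--     """
--     # TODO To be completed
--
--     if not is_number(n):
--         return None
--     if len(str(n)) % 2 != 0 or n < 0 or type(n) == float:
--         return None
--
--     character = ''
--     for i in range(0, len(str(n)), 2):
--         s = str(n)[i:i + 2]
--         character = character + chr(int(s))
--     return character
-- ===== SOURCE B (Python) =====
-- def process_number(n: int):
--     # arithmetic re-implementation: read the two-digit groups with divmod instead of string slicing
--     if type(n) is not int or n <= 0:
--         # non-ints (incl. bool/float) fail A's checks; 0 has one (odd) digit; negatives are rejected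
--         return None
--     d, t = 0, n
--     while t:
--         t //= 10
--         d += 1
--     if d % 2:
--         return None
--     chars = []
--     while n:
--         n, r = divmod(n, 100)
--         chars.append(chr(r))
--     return ''.join(reversed(chars))
-- ===== Notes on version B (the rewrite author's own statement) =====
-- stated objective: alternative
-- what changed: Replaces the string-slicing pair loop (str(n)[i:i+2] with int() and chr() per pair) by pure integer arithmetic: a digit-count loop for the parity check and a divmod(n,100) loop that collects the pair characters right-to-left, reversed and joined at the end.
import Mathlib
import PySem

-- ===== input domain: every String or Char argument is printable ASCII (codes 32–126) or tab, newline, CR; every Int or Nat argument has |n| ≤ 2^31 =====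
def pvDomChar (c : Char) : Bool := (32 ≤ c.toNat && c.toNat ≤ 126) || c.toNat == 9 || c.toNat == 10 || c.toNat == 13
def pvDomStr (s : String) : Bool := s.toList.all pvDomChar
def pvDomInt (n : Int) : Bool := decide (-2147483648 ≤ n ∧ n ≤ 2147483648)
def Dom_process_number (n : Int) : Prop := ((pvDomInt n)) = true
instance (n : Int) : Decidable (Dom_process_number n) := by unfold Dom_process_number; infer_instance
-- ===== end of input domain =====

-- B replaces A's string-slicing pair loop by integer arithmetic (digit count + divmod(n,100)); objective: alternative decomposition.

-- ===== PORT A =====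
-- A's loop body: character = character + chr(int(str(n)[i:i+2])); strings are carried as List Char.
-- int(s) on the two sliced digit chars never raises, so ofChars? … .getD 0 is exact on every reached input.
def pvAStep (s : List Char) (acc : List Char) (i : Int) : List Char :=
  acc ++ [Char.ofNat ((PySem.Int.ofChars? (PySem.List.slice s (some i) (some (i + 2)))).getD 0).toNat]

-- is_number(n) is True for every int, and type(n) == float is False for every int, so only the
-- even-length and negativity checks remain for an Int argument.
def process_number (n : Int) : Option String :=
  if PySem.Int.mod (PySem.List.len (PySem.Int.toChars n)) 2 ≠ 0 ∨ n < 0 then none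
  else
    some (String.ofList
      ((PySem.List.pyRange 0 (PySem.List.len (PySem.Int.toChars n)) 2).foldl
        (pvAStep (PySem.Int.toChars n)) []))

-- ===== PORT B =====
-- Source B: d, t = 0, n; while t: t //= 10; d += 1   (n > 0 here, so plain Nat division is exact)
def pvDigitCount : Nat → Nat
  | 0 => 0
  | m + 1 => pvDigitCount ((m + 1) / 10) + 1
decreasing_by exact Nat.div_lt_self (Nat.succ_pos m) (by norm_num)

-- Source B: while n: n, r = divmod(n, 100); chars.append(chr(r))
def pvChunks : Nat → List Char
  | 0 => []
  | m + 1 => Char.ofNat ((m + 1) % 100) :: pvChunks ((m + 1) / 100)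
decreasing_by exact Nat.div_lt_self (Nat.succ_pos m) (by norm_num)

-- type(n) is not int is False for every Int argument; n <= 0 covers Source B's rejection of 0 and negatives.
def process_number_alt (n : Int) : Option String :=
  if n ≤ 0 then none
  else if pvDigitCount n.toNat % 2 = 1 then none
  else some (String.ofList ((pvChunks n.toNat).reverse))

-- ===== PRECONDITION & SPEC =====
def Spec_process_number (n : Int) (out : Option String) : Prop := out = process_number_alt n
instance (n : Int) (out : Option String) : Decidable (Spec_process_number n out) := by unfold Spec_process_number; infer_instance

-- ===== CLAIM (what is proved, stated in full; the proofs are below) =====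
def Claim_equal_process_number : Prop := ∀ (n : Int), Dom_process_number n → Spec_process_number n (process_number n)

-- ===== LEMMAS AND PROOFS =====

-- toDigitsCore prepends to its accumulator
lemma pv_tdc_acc (f : Nat) : ∀ (n : Nat) (ds : List Char),
    Nat.toDigitsCore 10 f n ds = Nat.toDigitsCore 10 f n [] ++ ds := by
  induction f with
  | zero => intro n ds; simp [Nat.toDigitsCore]
  | succ f ih =>
    intro n ds
    simp only [Nat.toDigitsCore]
    by_cases h : n / 10 = 0
    · simp [h]
    · simp only [h, if_false]
      rw [ih (n / 10) (Nat.digitChar (n % 10) :: ds), ih (n / 10) [Nat.digitChar (n % 10)]]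
      simp

-- fuel irrelevance for sufficient fuel
lemma pv_tdc_fuel : ∀ (n f : Nat) (ds : List Char), n < f →
    Nat.toDigitsCore 10 f n ds = Nat.toDigitsCore 10 (n + 1) n ds := by
  intro n
  induction n using Nat.strong_induction_on with
  | _ n ih =>
    intro f ds hf
    match f, hf with
    | f + 1, hf =>
      simp only [Nat.toDigitsCore]
      by_cases h : n / 10 = 0
      · simp [h]
      · simp only [h, if_false]
        have hn : 0 < n := by omega
        have hlt : n / 10 < n := Nat.div_lt_self hn (by norm_num)
        rw [ih (n / 10) hlt f _ (by omega), ih (n / 10) hlt n _ (by omega)]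

lemma pv_toDigits_small {m : Nat} (h : m < 10) : Nat.toDigits 10 m = [Nat.digitChar m] := by
  simp only [Nat.toDigits, Nat.toDigitsCore]
  have : m / 10 = 0 := Nat.div_eq_of_lt h
  simp [this, Nat.mod_eq_of_lt h]

lemma pv_toDigits_step {m : Nat} (h : 10 ≤ m) :
    Nat.toDigits 10 m = Nat.toDigits 10 (m / 10) ++ [Nat.digitChar (m % 10)] := by
  have h0 : ¬ m / 10 = 0 := by omega
  have e1 : Nat.toDigits 10 m = Nat.toDigitsCore 10 m (m / 10) [Nat.digitChar (m % 10)] := by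
    simp only [Nat.toDigits, Nat.toDigitsCore]
    simp [h0]
  rw [e1, pv_tdc_acc, pv_tdc_fuel (m / 10) m [] (Nat.div_lt_self (by omega) (by norm_num))]
  rfl

lemma pv_toDigits_ne_nil (m : Nat) : Nat.toDigits 10 m ≠ [] := by
  by_cases h : m < 10
  · simp [pv_toDigits_small h]
  · rw [pv_toDigits_step (by omega)]; simp

lemma pv_toDigits_split {m : Nat} (h : 100 ≤ m) :
    Nat.toDigits 10 m
      = Nat.toDigits 10 (m / 100) ++ [Nat.digitChar (m % 100 / 10), Nat.digitChar (m % 100 % 10)] := by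
  rw [pv_toDigits_step (by omega), pv_toDigits_step (show 10 ≤ m / 10 by omega)]
  have h1 : m / 10 / 10 = m / 100 := by omega
  have h2 : m / 10 % 10 = m % 100 / 10 := by omega
  have h3 : m % 10 = m % 100 % 10 := by omega
  rw [h1, h2, h3]; simp

lemma pv_digitCount_pos {m : Nat} (h : 1 ≤ m) :
    pvDigitCount m = pvDigitCount (m / 10) + 1 := by
  obtain ⟨t, rfl⟩ : ∃ t, m = t + 1 := ⟨m - 1, by omega⟩
  simp [pvDigitCount]

lemma pv_chunks_pos {m : Nat} (h : 1 ≤ m) :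
    pvChunks m = Char.ofNat (m % 100) :: pvChunks (m / 100) := by
  obtain ⟨t, rfl⟩ : ∃ t, m = t + 1 := ⟨m - 1, by omega⟩
  simp [pvChunks]

-- pvDigitCount m = number of decimal digits of m (m ≥ 1)
lemma pv_digitCount_eq_len : ∀ m : Nat, 1 ≤ m → pvDigitCount m = (Nat.toDigits 10 m).length := by
  intro m
  induction m using Nat.strong_induction_on with
  | _ m ih =>
    intro hm
    by_cases h : m < 10
    · rw [pv_digitCount_pos hm, pv_toDigits_small h]
      have : m / 10 = 0 := Nat.div_eq_of_lt h
      simp [this, pvDigitCount]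
    · rw [pv_digitCount_pos hm, pv_toDigits_step (by omega),
        ih (m / 10) (Nat.div_lt_self (by omega) (by norm_num)) (by omega)]
      simp

-- int() of two digit characters
lemma pv_parse2 (r : Nat) (h : r < 100) :
    PySem.Int.ofChars? [Nat.digitChar (r / 10), Nat.digitChar (r % 10)] = some (r : Int) := by
  have H : ∀ r < 100, PySem.Int.ofChars? [Nat.digitChar (r / 10), Nat.digitChar (r % 10)] = some (r : Int) := by decide
  exact H r h

-- slice of an append that stays in the left part
lemma pv_slice_left (A B : List Char) (a b : Nat) (hb : b ≤ A.length) :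
    PySem.List.slice (A ++ B) (some (a : Int)) (some (b : Int))
      = PySem.List.slice A (some (a : Int)) (some (b : Int)) := by
  rw [PySem.List.slice_natCast, PySem.List.slice_natCast]
  rw [List.drop_append, List.take_append]
  by_cases hab : a ≤ b
  · rw [show b - a - (List.drop a A).length = 0 by simp; omega]
    simp
  · rw [show b - a = 0 by omega]
    simp

-- the range of pair starts, as a mapped List.range
lemma pv_range2 (k : Nat) :
    PySem.List.pyRange 0 (2 * (k : Int)) 2 = (List.range k).map (fun t => (2 * (t : Nat) : Int)) := by
  rw [PySem.List.pyRange_of_pos 0 (2 * (k : Int)) (by norm_num)]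
  by_cases hk : (0 : Int) < 2 * (k : Int)
  · simp only [hk, if_true]
    have : ((2 * (k : Int) - 0 + 2 - 1) / 2).toNat = k := by omega
    rw [this]
    apply List.map_congr_left
    intro t _
    ring
  · have hk0 : k = 0 := by omega
    simp [hk0]

-- MAIN: A's pair fold over str(m) equals B's reversed divmod chunks (m ≥ 1, even digit count 2*k)
lemma pv_main : ∀ (k m : Nat), 1 ≤ m → (Nat.toDigits 10 m).length = 2 * k →
    ((List.range k).map (fun t => (2 * (t : Nat) : Int))).foldl (pvAStep (Nat.toDigits 10 m)) []
      = (pvChunks m).reverse := by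
  intro k
  induction k with
  | zero =>
    intro m hm hlen
    exact absurd (List.length_eq_zero_iff.mp (by simpa using hlen)) (pv_toDigits_ne_nil m)
  | succ k ih =>
    intro m hm hlen
    by_cases hk : k = 0
    · -- two digits: 10 ≤ m < 100
      subst hk
      have h10 : 10 ≤ m := by
        by_contra h
        rw [pv_toDigits_small (by omega)] at hlen; simp at hlen
      have h100 : m < 100 := by
        by_contra h
        have h1 : 1 ≤ (Nat.toDigits 10 (m / 100)).length :=
          List.length_pos_iff.mpr (pv_toDigits_ne_nil (m / 100))
        rw [pv_toDigits_split (by omega)] at hlen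
        simp only [List.length_append, List.length_cons, List.length_nil] at hlen
        omega
      have hs : Nat.toDigits 10 m = [Nat.digitChar (m / 10), Nat.digitChar (m % 10)] := by
        rw [pv_toDigits_step h10, pv_toDigits_small (show m / 10 < 10 by omega)]
        rfl
      rw [hs]
      simp only [List.range_succ, List.range_zero, List.nil_append, List.map_cons, List.map_nil,
        List.foldl_cons, List.foldl_nil]
      unfold pvAStep
      rw [show ((2 * ((0:Nat) : Int)) : Int) = ((0:Nat) : Int) by norm_num]
      rw [show ((((0:Nat)) : Int) + 2) = ((2:Nat) : Int) by norm_num]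
      rw [PySem.List.slice_natCast]
      simp only [List.drop_zero]
      rw [List.take_of_length_le (by simp)]
      rw [pv_parse2 m h100]
      have hq0 : m / 100 = 0 := Nat.div_eq_of_lt h100
      rw [pv_chunks_pos hm, hq0, Nat.mod_eq_of_lt h100]
      show _ = List.reverse (Char.ofNat m :: pvChunks 0)
      simp [pvChunks]
    · -- 2k+2 digits, k ≥ 1: split off the last pair
      have hk1 : 1 ≤ k := by omega
      have h100 : 100 ≤ m := by
        by_contra h
        by_cases h10 : m < 10
        · rw [pv_toDigits_small h10] at hlen; simp at hlen; omega
        · rw [pv_toDigits_step (by omega), pv_toDigits_small (show m / 10 < 10 by omega)] at hlen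
          simp at hlen; omega
      set q := m / 100 with hq
      set r := m % 100 with hr
      have hsplit : Nat.toDigits 10 m
          = Nat.toDigits 10 q ++ [Nat.digitChar (r / 10), Nat.digitChar (r % 10)] :=
        pv_toDigits_split h100
      have hlenq : (Nat.toDigits 10 q).length = 2 * k := by
        rw [hsplit] at hlen; simp at hlen; omega
      have hq1 : 1 ≤ q := by omega
      rw [List.range_succ, List.map_append, List.foldl_append]
      have hpre :
          ((List.range k).map (fun t => (2 * (t : Nat) : Int))).foldl (pvAStep (Nat.toDigits 10 m)) []
            = ((List.range k).map (fun t => (2 * (t : Nat) : Int))).foldl (pvAStep (Nat.toDigits 10 q)) [] := by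
        apply PySem.List.foldl_congr_mem
        intro acc x hx
        simp only [List.mem_map, List.mem_range] at hx
        obtain ⟨t, ht, rfl⟩ := hx
        unfold pvAStep
        rw [show ((2 * ((t:Nat) : Int)) : Int) = ((2*t : Nat) : Int) by push_cast; ring]
        rw [show (((2*t : Nat) : Int) + 2) = ((2*t+2 : Nat) : Int) by push_cast; ring]
        rw [hsplit, pv_slice_left _ _ _ _ (by omega)]
      rw [hpre, ih q hq1 hlenq]
      simp only [List.map, List.foldl]
      unfold pvAStep
      rw [show ((2 * ((k:Nat) : Int)) : Int) = ((2*k : Nat) : Int) by push_cast; ring]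
      rw [show (((2*k : Nat) : Int) + 2) = ((2*k+2 : Nat) : Int) by push_cast; ring]
      rw [hsplit, PySem.List.slice_natCast]
      rw [show (2*k+2) - 2*k = 2 by omega]
      rw [show (2*k : Nat) = (Nat.toDigits 10 q).length from hlenq.symm,
        List.drop_left]
      rw [List.take_of_length_le (by simp)]
      rw [pv_parse2 r (by omega)]
      rw [pv_chunks_pos hm, ← hq, ← hr]
      simp

-- ===== VERDICT (by name: the statement is the Claim_ definition above) =====
theorem process_number_spec : Claim_equal_process_number := by
  intro n _
  unfold Spec_process_number process_number process_number_alt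
  by_cases hneg : n < 0
  · simp [hneg, PySem.Int.toChars, show n ≤ 0 by omega]
  · -- n ≥ 0: str(n) is the decimal digits of n.toNat
    have h0 : PySem.Int.toChars n = Nat.toDigits 10 n.toNat := by
      simp [PySem.Int.toChars, hneg]
    by_cases hz : n = 0
    · subst hz; decide
    · have hpos : ¬ n ≤ 0 := by omega
      have hm1 : 1 ≤ n.toNat := by omega
      have hlen : PySem.List.len (PySem.Int.toChars n) = ((Nat.toDigits 10 n.toNat).length : Int) := by
        rw [h0]; simp [PySem.List.len_eq]
      have hdc : pvDigitCount n.toNat = (Nat.toDigits 10 n.toNat).length :=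
        pv_digitCount_eq_len n.toNat hm1
      by_cases hodd : (Nat.toDigits 10 n.toNat).length % 2 = 1
      · -- odd digit count: both None
        have hA : PySem.Int.mod (PySem.List.len (PySem.Int.toChars n)) 2 ≠ 0 := by
          rw [hlen, show ((2:Int) = ((2:Nat) : Int)) by norm_num, PySem.Int.mod_natCast, hodd]
          norm_num
        rw [if_pos (Or.inl hA), if_neg hpos, if_pos (by rw [hdc]; exact hodd)]
      · -- even digit count 2*k: the main lemma
        have heven : (Nat.toDigits 10 n.toNat).length % 2 = 0 := by omega
        obtain ⟨k, hk⟩ : ∃ k, (Nat.toDigits 10 n.toNat).length = 2 * k :=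
          ⟨(Nat.toDigits 10 n.toNat).length / 2, by omega⟩
        have hA : ¬ (PySem.Int.mod (PySem.List.len (PySem.Int.toChars n)) 2 ≠ 0 ∨ n < 0) := by
          refine not_or.mpr ⟨not_not.mpr ?_, by omega⟩
          rw [hlen, show ((2:Int) = ((2:Nat) : Int)) by norm_num, PySem.Int.mod_natCast, heven]
          norm_num
        rw [if_neg hA, if_neg hpos, if_neg (by rw [hdc]; omega)]
        have hlen2 : PySem.List.len (PySem.Int.toChars n) = 2 * (k : Int) := by
          rw [hlen, hk]; push_cast; ring
        rw [hlen2, pv_range2, h0, pv_main k n.toNat hm1 hk]
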